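-- pv_equiv track=rewrite | github.com/JaneSoboleva/aoc2021 | 2021/day 03/day3.py | converter_to_binary
-- ===== SOURCE A (Python) =====
-- def converter_to_binary(value):
--     rslt = 0
--     mlt = 1
--     for x in range(len(value) - 1, -1, -1):
--         if value[x] == '0' or value[x] == '1':
--             if value[x] == '1':
--                 rslt += mlt
--             mlt *= 2
--     return rslt
-- ===== SOURCE B (Python) =====
-- def converter_to_binary(value):
--     rslt = 0
--     for c in value:
--         if c == '0' or c == '1':
--             rslt = 2 * rslt + (1 if c == '1' else 0)
--     return rslt
-- ===== Notes on version B (the rewrite author's own statement) =====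
-- stated objective: simpler
-- what changed: Replaces the right-to-left index loop maintaining a result+multiplier pair by a single-accumulator left-to-right Horner scan directly over the characters.
import Mathlib
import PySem

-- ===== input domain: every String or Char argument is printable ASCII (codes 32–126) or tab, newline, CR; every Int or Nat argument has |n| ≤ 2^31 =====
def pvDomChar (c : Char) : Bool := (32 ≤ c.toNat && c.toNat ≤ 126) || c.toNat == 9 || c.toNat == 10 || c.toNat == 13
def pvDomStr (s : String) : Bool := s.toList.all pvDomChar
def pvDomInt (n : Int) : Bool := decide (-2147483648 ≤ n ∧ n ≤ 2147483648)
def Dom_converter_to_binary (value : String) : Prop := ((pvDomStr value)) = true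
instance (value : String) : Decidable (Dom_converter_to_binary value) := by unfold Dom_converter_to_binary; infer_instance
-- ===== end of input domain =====

-- B replaces A's right-to-left index loop (result + multiplier pair) by a
-- single-accumulator left-to-right Horner scan over the characters; objective: simpler.

-- ===== PORT A =====
def converter_to_binary (value : String) : Int :=
  let cs := value.toList
  (((PySem.List.pyRange ((cs.length : Int) - 1) (-1) (-1)).foldl
      (fun (s : Int × Int) x =>
        let c := PySem.List.pyGetD cs x ' '   -- value[x]; x is always in range here
        if c = '0' ∨ c = '1' then
          ((if c = '1' then s.1 + s.2 else s.1), s.2 * 2)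
        else s)
      ((0 : Int), (1 : Int)))).1

-- ===== PORT B =====
def converter_to_binary_alt (value : String) : Int :=
  value.toList.foldl
    (fun (rslt : Int) c =>
      if c = '0' ∨ c = '1' then 2 * rslt + (if c = '1' then 1 else 0) else rslt)
    0

-- ===== PRECONDITION & SPEC =====
def Spec_converter_to_binary (value : String) (out : Int) : Prop := out = converter_to_binary_alt value
instance (value : String) (out : Int) : Decidable (Spec_converter_to_binary value out) := by unfold Spec_converter_to_binary; infer_instance

-- ===== CLAIM (what is proved, stated in full; the proofs are below) =====
def Claim_equal_converter_to_binary : Prop := ∀ (value : String), Dom_converter_to_binary value → Spec_converter_to_binary value (converter_to_binary value)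

-- ===== LEMMAS AND PROOFS =====

-- B's loop body and A's loop body, as functions on the char
def pvBStep (r : Int) (c : Char) : Int :=
  if c = '0' ∨ c = '1' then 2 * r + (if c = '1' then 1 else 0) else r

def pvAStep (s : Int × Int) (c : Char) : Int × Int :=
  if c = '0' ∨ c = '1' then ((if c = '1' then s.1 + s.2 else s.1), s.2 * 2) else s

-- Horner fold with an arbitrary start splits off the start scaled by 2^(valid count)
theorem pvB_foldl_init (l : List Char) (a : Int) :
    l.foldl pvBStep a
      = a * 2 ^ (l.countP (fun c => decide (c = '0' ∨ c = '1'))) + l.foldl pvBStep 0 := by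
  induction l generalizing a with
  | nil => simp
  | cons c t ih =>
    rw [List.foldl_cons, List.foldl_cons, List.countP_cons]
    by_cases h : c = '0' ∨ c = '1'
    · simp only [pvBStep, if_pos h, decide_eq_true h, if_true]
      rw [pow_succ, ih (2 * a + if c = '1' then 1 else 0), ih (2 * 0 + if c = '1' then 1 else 0)]
      ring
    · simp only [pvBStep, if_neg h, decide_eq_false h, Bool.false_eq_true, if_false, add_zero]
      rw [ih a]

-- A's foldr state is (B's value, 2^(number of valid chars))
theorem pvA_foldr_eq (l : List Char) :
    l.foldr (fun c s => pvAStep s c) ((0 : Int), (1 : Int))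
      = (l.foldl pvBStep 0, 2 ^ (l.countP (fun c => decide (c = '0' ∨ c = '1')))) := by
  induction l with
  | nil => simp
  | cons c t ih =>
    rw [List.foldr_cons, ih, List.foldl_cons, List.countP_cons]
    by_cases h : c = '0' ∨ c = '1'
    · simp only [pvAStep, if_pos h, decide_eq_true h, if_true]
      rw [Prod.mk.injEq]
      constructor
      · rw [pvB_foldl_init t (pvBStep 0 c)]
        have hb : (pvBStep 0 c) = (if c = '1' then 1 else 0) := by simp [pvBStep, h]
        rw [hb]
        by_cases h1 : c = '1'
        · rw [if_pos h1, if_pos h1]; ring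
        · rw [if_neg h1, if_neg h1]; ring
      · rw [pow_succ]
    · simp only [pvAStep, if_neg h, decide_eq_false h, Bool.false_eq_true, if_false, add_zero]
      rw [Prod.mk.injEq]
      refine ⟨?_, rfl⟩
      rw [pvB_foldl_init t (pvBStep 0 c)]
      simp [pvBStep, h]

-- the whole equivalence, stated over the character list
theorem pvMain (cs : List Char) :
    ((PySem.List.pyRange ((cs.length : Int) - 1) (-1) (-1)).foldl
      (fun (s : Int × Int) x => pvAStep s (PySem.List.pyGetD cs x ' '))
      ((0 : Int), (1 : Int))).1 = cs.foldl pvBStep 0 := by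
  have h1 : PySem.List.pyRange ((cs.length : Int) - 1) (-1) (-1)
      = (PySem.List.pyRange 0 (cs.length : Int) 1).reverse := by
    rw [PySem.List.pyRange_neg_one_eq_reverse]
    norm_num
  have h3 : (PySem.List.pyRange 0 (cs.length : Int) 1).map
      (fun x => PySem.List.pyGetD cs x ' ') = cs :=
    PySem.List.map_pyGetD_pyRange_zero cs ' '
  rw [h1, ← List.foldl_map (f := fun x => PySem.List.pyGetD cs x ' ') (g := pvAStep),
      List.map_reverse, h3, List.foldl_reverse, pvA_foldr_eq]

-- ===== VERDICT (by name: the statement is the Claim_ definition above) =====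
theorem converter_to_binary_spec : Claim_equal_converter_to_binary := by
  intro value _
  show converter_to_binary value = converter_to_binary_alt value
  exact pvMain value.toList
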